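-- pv_equiv track=rewrite | github.com/igorvanloo/Project-Euler-Explained | Unfinished Problems/pe00284 - Steady Squares.py | NumberToBase14
-- ===== SOURCE A (Python) =====
-- def numberToBase(n, b):
--     if n == 0:
--         return [0]
--     digits = []
--     while n != 0:
--         digits.append(int(n % b))
--         n //= b
--     return digits[::-1]
--
-- def NumberToBase14(n):
--     digits = numberToBase(n, 14)
--     new_digits = []
--     for x in digits:
--         if x == 10:
--             new_digits.append("a")
--         elif x == 11:
--             new_digits.append("b")
--         elif x == 12:
--             new_digits.append("c")
--         elif x == 13:
--             new_digits.append("d")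
--         else:
--             new_digits.append(str(x))
--     return "".join(new_digits)
-- ===== SOURCE B (Python) =====
-- def NumberToBase14(n):
--     digits = "0123456789abcd"
--     if 0 <= n < 14:
--         return digits[n]
--     return NumberToBase14(n // 14) + digits[n % 14]
-- ===== Notes on version B (the rewrite author's own statement) =====
-- stated objective: simpler
-- what changed: Replaces A's two-pass pipeline (build a digit list low-to-high in a while loop, reverse it, then translate each digit through an if/elif chain and join) with a single direct divide-by-base recursion indexing one digit string, emitting most-significant-first.
import Mathlib
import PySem

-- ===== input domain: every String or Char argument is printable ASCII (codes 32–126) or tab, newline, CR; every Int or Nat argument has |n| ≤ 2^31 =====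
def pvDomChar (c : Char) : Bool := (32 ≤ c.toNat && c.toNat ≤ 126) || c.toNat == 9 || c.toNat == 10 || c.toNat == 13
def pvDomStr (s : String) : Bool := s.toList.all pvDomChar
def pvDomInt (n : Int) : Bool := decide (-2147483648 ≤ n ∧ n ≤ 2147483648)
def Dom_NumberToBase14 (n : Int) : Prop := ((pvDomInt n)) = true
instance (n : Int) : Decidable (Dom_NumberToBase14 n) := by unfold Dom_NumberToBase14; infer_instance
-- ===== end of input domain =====

-- B replaces A's build-list / reverse / translate-and-join pipeline with a direct
-- divide-by-base recursion over one digit string (objective: simpler; same cost).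

-- termination helpers cited by the ports' decreasing_by
lemma pv_floordiv_lt (n b : Int) (hn : 0 < n) (hb : 1 < b) : PySem.Int.floordiv n b < n := by
  rw [PySem.Int.floordiv_lt_iff_lt_mul (by omega)]
  nlinarith

lemma pv_floordiv_nonneg (n b : Int) (hn : 0 ≤ n) (hb : 0 < b) : 0 ≤ PySem.Int.floordiv n b := by
  rw [PySem.Int.le_floordiv_iff_mul_le hb]
  simpa using hn

-- ===== PORT A =====
-- while n != 0: digits.append(int(n % b)); n //= b
-- (the 'n < 0 ∨ b ≤ 1' branch is a totality guard only: there Python's loop never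
-- terminates, and such inputs lie outside Pre_)
def ntbLoop (n b : Int) (digits : List Int) : List Int :=
  if _h1 : n = 0 then digits
  else if _h2 : n < 0 ∨ b ≤ 1 then digits
  else ntbLoop (PySem.Int.floordiv n b) b (digits ++ [PySem.Int.mod n b])
termination_by n.toNat
decreasing_by
  have h1 := pv_floordiv_lt n b (by omega) (by omega)
  have h2 := pv_floordiv_nonneg n b (by omega) (by omega)
  omega

def numberToBase (n b : Int) : List Int :=
  if n = 0 then [0]
  else (ntbLoop n b []).reverse   -- digits[::-1] is List.reverse (PySem.List.slice?_none_none_neg_one)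

def aDigit (x : Int) : String :=
  if x = 10 then "a"
  else if x = 11 then "b"
  else if x = 12 then "c"
  else if x = 13 then "d"
  else PySem.Int.toStr x

def NumberToBase14 (n : Int) : String :=
  PySem.Str.join "" ((numberToBase n 14).map aDigit)

-- ===== PORT B =====
def bDigit (i : Int) : String :=
  match PySem.Str.pyGet? "0123456789abcd" i with
  | some c => String.ofList [c]
  | none => ""

-- (the 'n < 0' branch is a totality guard only: there Python B recurses without
-- bound, and such inputs lie outside Pre_)
def NumberToBase14_alt (n : Int) : String :=
  if _h : 0 ≤ n ∧ n < 14 then bDigit n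
  else if _h2 : n < 0 then ""
  else NumberToBase14_alt (PySem.Int.floordiv n 14) ++ bDigit (PySem.Int.mod n 14)
termination_by n.toNat
decreasing_by
  have h1 := pv_floordiv_lt n 14 (by omega) (by omega)
  have h2 := pv_floordiv_nonneg n 14 (by omega) (by omega)
  omega

-- ===== PRECONDITION & SPEC =====
-- Pre_ excludes negative n, on which Python A's while loop never terminates
-- (n //= 14 is stuck at -1), so A returns nothing there (B raises RecursionError).
def Pre_NumberToBase14 (n : Int) : Prop := 0 ≤ n
instance (n : Int) : Decidable (Pre_NumberToBase14 n) := by unfold Pre_NumberToBase14; infer_instance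
def pvWitness_NumberToBase14 : Int := (37)

def Spec_NumberToBase14 (n : Int) (out : String) : Prop := out = NumberToBase14_alt n
instance (n : Int) (out : String) : Decidable (Spec_NumberToBase14 n out) := by unfold Spec_NumberToBase14; infer_instance

-- ===== CLAIM (what is proved, stated in full; the proofs are below) =====
def Claim_equal_NumberToBase14 : Prop := ∀ (n : Int), Dom_NumberToBase14 n → Pre_NumberToBase14 n → Spec_NumberToBase14 n (NumberToBase14 n)

-- ===== LEMMAS AND PROOFS =====

lemma ntbLoop_stop (n b : Int) (digits : List Int) (h : n = 0 ∨ n < 0 ∨ b ≤ 1) :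
    ntbLoop n b digits = digits := by
  rw [ntbLoop]
  split_ifs with h1 h2
  · rfl
  · rfl
  · exfalso; omega

-- the accumulator of A's while loop only collects output: it can be pulled out front
lemma ntbLoop_acc (k : Nat) : ∀ (n b : Int) (acc : List Int), n.toNat ≤ k →
    ntbLoop n b acc = acc ++ ntbLoop n b [] := by
  induction k with
  | zero =>
    intro n b acc hk
    have h : n = 0 ∨ n < 0 ∨ b ≤ 1 := by omega
    rw [ntbLoop_stop _ _ _ h, ntbLoop_stop _ _ _ h]
    simp
  | succ k ih =>
    intro n b acc hk
    by_cases h1 : n = 0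
    · rw [ntbLoop_stop _ _ _ (Or.inl h1), ntbLoop_stop _ _ _ (Or.inl h1)]; simp
    by_cases h2 : n < 0 ∨ b ≤ 1
    · rw [ntbLoop_stop _ _ _ (Or.inr h2), ntbLoop_stop _ _ _ (Or.inr h2)]; simp
    · have hfd : (PySem.Int.floordiv n b).toNat ≤ k := by
        have := pv_floordiv_lt n b (by omega) (by omega)
        have := pv_floordiv_nonneg n b (by omega) (by omega)
        omega
      conv_lhs => rw [ntbLoop]
      conv_rhs => rw [ntbLoop]
      rw [dif_neg h1, dif_neg h2, dif_neg h1, dif_neg h2]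
      rw [ih _ _ (acc ++ [PySem.Int.mod n b]) hfd,
          ih _ _ ([] ++ [PySem.Int.mod n b]) hfd]
      simp

-- one unfolding of A's loop for positive n
lemma ntbLoop_pos (n : Int) (h : 0 < n) :
    ntbLoop n 14 [] = PySem.Int.mod n 14 :: ntbLoop (PySem.Int.floordiv n 14) 14 [] := by
  conv_lhs => rw [ntbLoop]
  rw [dif_neg (show ¬ n = 0 by omega), dif_neg (show ¬ (n < 0 ∨ (14:Int) ≤ 1) by omega)]
  rw [ntbLoop_acc (PySem.Int.floordiv n 14).toNat _ _ _ le_rfl]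
  simp

lemma intercalate_nil_flatten (xs : List (List Char)) : [].intercalate xs = xs.flatten := by
  induction xs with
  | nil => rfl
  | cons h t ih => cases t <;> simp_all [List.intercalate, List.intersperse]

-- "".join over A's digit list, peeled at the back
lemma joinA_append (l : List Int) (d : Int) :
    PySem.Str.join "" ((l ++ [d]).map aDigit)
      = PySem.Str.join "" (l.map aDigit) ++ aDigit d := by
  apply String.toList_inj.mp
  simp only [pysem, PySem.Chars.join, List.map_append, List.map_map, String.toList_append]
  rw [show "".toList = ([] : List Char) from rfl, intercalate_nil_flatten, intercalate_nil_flatten]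
  simp

lemma joinA_single (d : Int) :
    PySem.Str.join "" ([d].map aDigit) = aDigit d := by
  apply String.toList_inj.mp
  simp only [pysem, PySem.Chars.join, List.map_cons, List.map_nil]
  rw [show "".toList = ([] : List Char) from rfl, intercalate_nil_flatten]
  simp

-- the two digit translations agree on base-14 digits
lemma digit_eq (d : Int) (h0 : 0 ≤ d) (h14 : d < 14) : aDigit d = bDigit d := by
  interval_cases d <;> (apply String.toList_inj.mp; decide)

lemma base0_eq : NumberToBase14 0 = NumberToBase14_alt 0 := by
  rw [NumberToBase14, numberToBase, if_pos rfl,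
      NumberToBase14_alt, dif_pos (show (0:Int) ≤ 0 ∧ (0:Int) < 14 by omega)]
  exact (joinA_single 0).trans (digit_eq 0 le_rfl (by omega))

lemma main_eq (k : Nat) : ∀ (n : Int), 0 ≤ n → n.toNat ≤ k →
    NumberToBase14 n = NumberToBase14_alt n := by
  induction k with
  | zero =>
    intro n h0 hk
    have : n = 0 := by omega
    subst this
    exact base0_eq
  | succ k ih =>
    intro n h0 hk
    by_cases hz : n = 0
    · subst hz; exact base0_eq
    have hmod0 : 0 ≤ PySem.Int.mod n 14 := PySem.Int.mod_nonneg _ (by omega)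
    have hmod14 : PySem.Int.mod n 14 < 14 := PySem.Int.mod_lt _ (by omega)
    by_cases hlt : n < 14
    · -- a single digit: A's loop runs once
      have hfd : PySem.Int.floordiv n 14 = 0 := by
        rw [PySem.Int.floordiv_eq_ediv_of_pos (by omega)]
        omega
      have hmod : PySem.Int.mod n 14 = n := by
        rw [PySem.Int.mod_eq_emod_of_pos (by omega)]
        exact Int.emod_eq_of_lt h0 hlt
      rw [NumberToBase14, numberToBase, if_neg hz, ntbLoop_pos n (by omega), hfd, hmod,
          ntbLoop_stop 0 14 [] (Or.inl rfl),
          NumberToBase14_alt, dif_pos ⟨h0, hlt⟩]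
      simpa using (joinA_single n).trans (digit_eq n h0 hlt)
    · -- n ≥ 14: peel the least significant digit on both sides
      have hfdpos : 0 < PySem.Int.floordiv n 14 := by
        rw [PySem.Int.floordiv_eq_ediv_of_pos (by omega)]
        omega
      have hfdk : (PySem.Int.floordiv n 14).toNat ≤ k := by
        have := pv_floordiv_lt n 14 (by omega) (by omega)
        omega
      have ihfd := ih (PySem.Int.floordiv n 14) (by omega) hfdk
      rw [NumberToBase14, numberToBase, if_neg hz, ntbLoop_pos n (by omega)]
      rw [List.reverse_cons, joinA_append]
      rw [NumberToBase14_alt, dif_neg (by omega), dif_neg (by omega)]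
      rw [digit_eq _ hmod0 hmod14, ← ihfd]
      rw [NumberToBase14, numberToBase, if_neg (by omega)]

-- ===== VERDICT (by name: the statement is the Claim_ definition above) =====
theorem NumberToBase14_spec : Claim_equal_NumberToBase14 := by
  intro n _ hpre
  unfold Spec_NumberToBase14
  exact main_eq n.toNat n hpre le_rfl
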